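-- pv_equiv track=rewrite | github.com/sladuf/Algorithm | Programmers/KAKAO 기출/PRO92334/PRO92334.py | solution
-- ===== SOURCE A (Python) =====
-- from collections import defaultdict
--
-- def solution(id_list, report, k):
--     answer = []
--     dic = defaultdict(list)
--     cnt = defaultdict(int)
--
--     for i in set(report):
--         a,b = i.split(" ")
--         dic[a].append(b)
--         cnt[b] += 1
--
--     for i in id_list:
--         temp = 0
--         for j in dic[i]:
--             if cnt[j] >= k:
--                 temp+=1
--         answer.append(temp)
--
--     return answer
-- ===== SOURCE B (Python) =====
-- def solution(id_list, report, k):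
--     # invert the reports: reported user -> set of distinct reporters
--     reporters = {}
--     for r in set(report):
--         a, b = r.split(" ")
--         reporters.setdefault(b, set()).add(a)
--     # start everyone at 0, then credit the reporters of each banned user
--     score = {i: 0 for i in id_list}
--     for b, who in reporters.items():
--         if len(who) >= k:
--             for a in who:
--                 if a in score:
--                     score[a] += 1
--     return [score[i] for i in id_list]
-- ===== Notes on version B (the rewrite author's own statement) =====
-- stated objective: alternative
-- what changed: A builds reporter->reported adjacency lists plus a report counter and re-checks the banned threshold for every entry of every id's list; B inverts the mapping (reported -> set of distinct reporters), decides once per reported user whether they are banned, and credits that user's reporters in a result dict initialised to 0 over id_list.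
import Mathlib
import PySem

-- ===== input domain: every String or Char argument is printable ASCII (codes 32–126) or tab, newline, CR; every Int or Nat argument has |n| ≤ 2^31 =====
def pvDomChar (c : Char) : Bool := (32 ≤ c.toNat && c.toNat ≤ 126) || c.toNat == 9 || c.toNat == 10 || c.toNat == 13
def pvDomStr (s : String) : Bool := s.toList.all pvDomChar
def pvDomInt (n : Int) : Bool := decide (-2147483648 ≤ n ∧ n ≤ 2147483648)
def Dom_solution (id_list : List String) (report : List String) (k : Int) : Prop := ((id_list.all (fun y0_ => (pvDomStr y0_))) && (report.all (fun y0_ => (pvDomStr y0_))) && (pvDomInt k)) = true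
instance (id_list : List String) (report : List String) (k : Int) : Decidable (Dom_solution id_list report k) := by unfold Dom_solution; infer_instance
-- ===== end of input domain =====

-- B inverts the reports (reported user -> set of distinct reporters), determines the banned users
-- once, and credits each banned user's reporters, instead of A's per-reporter adjacency lists
-- re-scanned for every id (objective: alternative; same asymptotic cost).

-- ===== PORT A =====
def solution (id_list : List String) (report : List String) (k : Int) : List Int :=
  -- dic = defaultdict(list); cnt = defaultdict(int)
  -- for i in set(report): a,b = i.split(" "); dic[a].append(b); cnt[b] += 1
  let dc := (PySem.Set.ofList report).foldl
    (fun (dc : PySem.Dict String (List String) × PySem.Dict String Int) i =>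
      match PySem.Str.split? i " " with
      | some [a, b] => (dc.1.modify a [] (· ++ [b]), dc.2.modify b 0 (· + 1))
      | _ => dc)  -- the a,b unpack raises ValueError here: outside Pre_solution
    (PySem.Dict.empty, PySem.Dict.empty)
  -- for i in id_list: temp = 0; for j in dic[i]: if cnt[j] >= k: temp += 1; answer.append(temp)
  -- (the defaultdict reads dic[i] / cnt[j] insert default entries into the dicts; the returned
  --  value only ever sees those defaults, so getD is exact for the return value)
  id_list.foldl
    (fun answer i =>
      answer ++ [(dc.1.getD i []).foldl (fun temp j => if dc.2.getD j 0 ≥ k then temp + 1 else temp) 0])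
    []

-- ===== PORT B =====
def solution_alt (id_list : List String) (report : List String) (k : Int) : List Int :=
  -- reporters = {}; for r in set(report): a,b = r.split(" "); reporters.setdefault(b, set()).add(a)
  -- (setdefault(b, set()).add(a) updates the entry at b to get(b, set()) | {a}: Dict.modify)
  let reporters := (PySem.Set.ofList report).foldl
    (fun (d : PySem.Dict String (PySem.Set String)) r =>
      -- r.split(" ") with a non-empty separator is always a list (never None)
      match (PySem.Str.split? r " ").getD [] with
      | [a, b] => d.modify b PySem.Set.empty (fun s => s.add a)
      | [] => d          -- a,b unpack raises ValueError: outside Pre_solution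
      | [_] => d
      | _ :: _ :: _ :: _ => d)
    PySem.Dict.empty
  -- score = {i: 0 for i in id_list}
  let score0 := id_list.foldl (fun (d : PySem.Dict String Int) i => d.insert i 0) PySem.Dict.empty
  -- for b, who in reporters.items(): if len(who) >= k: for a in who: if a in score: score[a] += 1
  let score := reporters.items.foldl
    (fun (sc : PySem.Dict String Int) bw =>
      if k ≤ (bw.2.length : Int) then
        bw.2.foldl (fun sc a => if sc.contains a then sc.modify a 0 (· + 1) else sc) sc
      else sc)
    score0
  -- return [score[i] for i in id_list]
  id_list.map (fun i => score.getD i 0)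

-- ===== PRECONDITION & SPEC =====
-- Pre_ excludes report entries that do not split on " " into exactly two parts: on those
-- 'a,b = i.split(" ")' raises ValueError in A (and B raises there just the same).
def Pre_solution (id_list : List String) (report : List String) (k : Int) : Prop :=
  (report.all (fun r => ((PySem.Str.split? r " ").getD []).length == 2)) = true
instance (id_list : List String) (report : List String) (k : Int) : Decidable (Pre_solution id_list report k) := by unfold Pre_solution; infer_instance

def pvWitness_solution : List String × List String × Int :=
  (["muzi", "frodo", "apeach"], ["muzi frodo", "apeach frodo", "muzi frodo"], 2)

def Spec_solution (id_list : List String) (report : List String) (k : Int) (out : List Int) : Prop := out = solution_alt id_list report k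
instance (id_list : List String) (report : List String) (k : Int) (out : List Int) : Decidable (Spec_solution id_list report k out) := by unfold Spec_solution; infer_instance

-- ===== CLAIM (what is proved, stated in full; the proofs are below) =====
def Claim_equal_solution : Prop := ∀ (id_list : List String) (report : List String) (k : Int), Dom_solution id_list report k → Pre_solution id_list report k → Spec_solution id_list report k (solution id_list report k)

-- ===== LEMMAS AND PROOFS =====

def chSplit : List Char → List Char → List (List Char)
  | pre, [] => [pre]
  | pre, c :: rest => if c = ' ' then pre :: chSplit [] rest else chSplit (pre ++ [c]) rest

theorem chSplit_ne_nil : ∀ (l pre : List Char), chSplit pre l ≠ [] := by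
  intro l
  induction l with
  | nil => intro pre; simp [chSplit]
  | cons c rest ih =>
    intro pre
    by_cases hc : c = ' ' <;> simp [chSplit, hc] <;> exact ih _

theorem chSplit_go_eq (fuel : Nat) : ∀ (l cur : List Char) (acc : List (List Char)), l.length < fuel →
    PySem.Chars.splitOn.go [' '] fuel l cur acc = acc.reverse ++ chSplit cur.reverse l := by
  induction fuel with
  | zero => intro l cur acc h; omega
  | succ n ih =>
    intro l cur acc h
    cases l with
    | nil => simp [PySem.Chars.splitOn.go, chSplit]
    | cons c rest =>
      rw [PySem.Chars.splitOn.go]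
      by_cases hc : c = ' '
      · subst hc
        simp only [List.isPrefixOf, BEq.rfl, Bool.and_eq_true, and_self, if_true, List.length_cons,
          List.drop_succ_cons, List.length_nil, List.drop_zero]
        rw [ih rest [] (cur.reverse :: acc) (by simpa using Nat.lt_of_succ_lt_succ h)]
        simp [chSplit]
      · have hpre : [' '].isPrefixOf (c :: rest) = false := by
          simp [List.isPrefixOf]
          exact fun hh => absurd hh.symm hc
        rw [hpre]
        simp only [Bool.false_eq_true, if_false]
        rw [ih rest (c :: cur) acc (by simpa using Nat.lt_of_succ_lt_succ h)]
        simp [chSplit, hc]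

theorem splitOn_space_eq (l : List Char) : PySem.Chars.splitOn l [' '] = chSplit [] l := by
  have := chSplit_go_eq (l.length + 1) l [] [] (by omega)
  simpa [PySem.Chars.splitOn] using this

theorem chSplit_single : ∀ (l pre x : List Char), chSplit pre l = [x] → pre ++ l = x := by
  intro l
  induction l with
  | nil => intro pre x h; simp [chSplit] at h; simp [h]
  | cons c rest ih =>
    intro pre x h
    by_cases hc : c = ' '
    · subst hc; simp [chSplit] at h
      exact absurd h.2 (chSplit_ne_nil rest [])
    · simp [chSplit, hc] at h
      have := ih (pre ++ [c]) x h
      simpa using this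

theorem chSplit_pair : ∀ (l pre a b : List Char), chSplit pre l = [a, b] → pre ++ l = a ++ ' ' :: b := by
  intro l
  induction l with
  | nil => intro pre a b h; simp [chSplit] at h
  | cons c rest ih =>
    intro pre a b h
    by_cases hc : c = ' '
    · subst hc; simp [chSplit] at h
      obtain ⟨h1, h2⟩ := h
      subst h1
      have := chSplit_single rest [] b (by simpa using h2)
      simp at this
      simp [this]
    · simp [chSplit, hc] at h
      have := ih (pre ++ [c]) a b h
      simpa using this

def pvFst (r : String) : String := ((PySem.Str.split? r " ").getD [])[0]!
def pvSnd (r : String) : String := ((PySem.Str.split? r " ").getD [])[1]!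

theorem split_space (r : String) :
    PySem.Str.split? r " " = some ((chSplit [] r.toList).map String.ofList) := by
  simp [PySem.Str.split?, PySem.Chars.split?, splitOn_space_eq]

theorem split_two_eq (r a b : String) (h : PySem.Str.split? r " " = some [a, b]) :
    r.toList = a.toList ++ ' ' :: b.toList := by
  rw [split_space] at h
  have h' := Option.some.inj h
  cases hcs : chSplit [] r.toList with
  | nil => exact absurd hcs (chSplit_ne_nil _ _)
  | cons x t =>
    rw [hcs] at h'
    cases t with
    | nil => simp at h'
    | cons y t2 =>
      cases t2 with
      | nil =>
        simp at h'
        obtain ⟨hx, hy⟩ := h'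
        have := chSplit_pair r.toList [] x y hcs
        simp at this
        rw [this, ← hx, ← hy]
        simp [String.toList_ofList]
      | cons z t3 => simp at h'

theorem split_eq_of_len (r : String) (h : (((PySem.Str.split? r " ").getD []).length == 2) = true) :
    PySem.Str.split? r " " = some [pvFst r, pvSnd r] := by
  rw [split_space] at h ⊢
  simp at h
  unfold pvFst pvSnd
  rw [split_space]
  cases hcs : chSplit [] r.toList with
  | nil => simp [hcs] at h
  | cons x t =>
    rw [hcs] at h
    cases t with
    | nil => simp at h
    | cons y t2 =>
      cases t2 with
      | nil => simp
      | cons z t3 => simp at h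

theorem getD_foldl_modify_key {ν : Type} (l : List String) (key : String → String) (d0 : ν)
    (f : String → ν → ν) : ∀ (d : PySem.Dict String ν) (b : String),
    (l.foldl (fun d x => d.modify (key x) d0 (f x)) d).getD b d0
      = (l.filter (fun x => key x == b)).foldl (fun v x => f x v) (d.getD b d0) := by
  induction l with
  | nil => intro d b; simp
  | cons x rest ih =>
    intro d b
    simp only [List.foldl_cons, List.filter_cons]
    by_cases hb : key x = b
    · simp only [hb, BEq.rfl, if_true, List.foldl_cons]
      rw [ih]
      rw [PySem.Dict.getD_modify]
      simp
    · have : (key x == b) = false := by simp [hb]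
      simp only [this, Bool.false_eq_true, if_false]
      rw [ih, PySem.Dict.getD_modify]
      simp [Ne.symm hb]

theorem inner_contains (who : List String) : ∀ (sc : PySem.Dict String Int) (j : String),
    (who.foldl (fun sc a => if sc.contains a then sc.modify a 0 (· + 1) else sc) sc).contains j
      = sc.contains j := by
  induction who with
  | nil => intro sc j; simp
  | cons a rest ih =>
    intro sc j
    simp only [List.foldl_cons]
    by_cases hca : sc.contains a = true
    · simp only [hca, if_true]
      rw [ih, PySem.Dict.contains_modify]
      by_cases hj : j = a
      · simp [hj, hca]
      · simp [hj]
    · simp only [Bool.not_eq_true] at hca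
      simp [hca, ih]

theorem inner_getD (i : String) (who : List String) : ∀ (sc : PySem.Dict String Int),
    sc.contains i = true →
    (who.foldl (fun sc a => if sc.contains a then sc.modify a 0 (· + 1) else sc) sc).getD i 0
      = sc.getD i 0 + (who.count i : Int) := by
  induction who with
  | nil => intro sc h; simp
  | cons a rest ih =>
    intro sc h
    simp only [List.foldl_cons]
    by_cases hca : sc.contains a = true
    · simp only [hca, if_true]
      rw [ih _ (by rw [PySem.Dict.contains_modify, h]; simp)]
      rw [PySem.Dict.getD_modify]
      by_cases hia : i = a
      · subst hia
        simp
        ring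
      · simp [hia, Ne.symm hia]
    · simp only [Bool.not_eq_true] at hca
      have hia : i ≠ a := by intro hh; rw [hh] at h; rw [h] at hca; cases hca
      simp only [hca, Bool.false_eq_true, if_false]
      rw [ih _ h]
      simp [Ne.symm hia]

theorem outer_getD (k : Int) (i : String) (L : List (String × PySem.Set String)) :
    ∀ (sc : PySem.Dict String Int), sc.contains i = true →
    (L.foldl (fun sc bw =>
        if k ≤ (bw.2.length : Int) then
          bw.2.foldl (fun sc a => if sc.contains a then sc.modify a 0 (· + 1) else sc) sc
        else sc) sc).getD i 0
      = sc.getD i 0 + (L.map (fun bw =>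
          if k ≤ (bw.2.length : Int) then (bw.2.count i : Int) else 0)).sum := by
  induction L with
  | nil => intro sc h; simp
  | cons bw rest ih =>
    intro sc h
    simp only [List.foldl_cons, List.map_cons, List.sum_cons]
    by_cases hk : k ≤ (bw.2.length : Int)
    · simp only [hk, if_true]
      rw [ih _ (by rw [inner_contains]; exact h), inner_getD i _ _ h]
      ring
    · simp only [hk, if_false]
      rw [ih _ h]
      ring

theorem score0_getD (l : List String) : ∀ (d : PySem.Dict String Int),
    (∀ j, d.getD j 0 = 0) → ∀ i, (l.foldl (fun d i => d.insert i 0) d).getD i 0 = 0 := by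
  induction l with
  | nil => intro d hd i; simp [hd]
  | cons x rest ih =>
    intro d hd i
    simp only [List.foldl_cons]
    exact ih _ (fun j => by rw [PySem.Dict.getD_insert]; split <;> simp [hd]) i

theorem main_eq (id_list report : List String) (k : Int)
    (hpre : (report.all (fun r => ((PySem.Str.split? r " ").getD []).length == 2)) = true) :
    solution id_list report k = solution_alt id_list report k := by
  have hS : ∀ r ∈ PySem.Set.ofList report, PySem.Str.split? r " " = some [pvFst r, pvSnd r] := by
    intro r hr
    exact split_eq_of_len r (by
      rw [List.all_eq_true] at hpre
      exact hpre r ((PySem.Set.mem_ofList report r).1 hr))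
  simp only [solution, solution_alt]
  -- rewrite B's fold into a keyed fold
  rw [PySem.List.foldl_congr_mem (PySem.Set.ofList report) _
      (fun (d : PySem.Dict String (PySem.Set String)) r =>
        d.modify (pvSnd r) PySem.Set.empty (fun s => s.add (pvFst r)))
      PySem.Dict.empty
      (by intro acc x hx; rw [hS x hx]; rfl)]
  -- rewrite A's combined fold into two keyed folds
  rw [PySem.List.foldl_congr_mem (PySem.Set.ofList report) _
      (fun (dc : PySem.Dict String (List String) × PySem.Dict String Int) r =>
        (dc.1.modify (pvFst r) [] (· ++ [pvSnd r]), dc.2.modify (pvSnd r) 0 (· + 1)))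
      (PySem.Dict.empty, PySem.Dict.empty)
      (by intro acc x hx; rw [hS x hx])]
  rw [PySem.List.foldl_prod_mk
      (fun (d : PySem.Dict String (List String)) r => d.modify (pvFst r) [] (· ++ [pvSnd r]))
      (fun (c : PySem.Dict String Int) r => c.modify (pvSnd r) 0 (· + 1))
      (PySem.Set.ofList report) PySem.Dict.empty PySem.Dict.empty]
  rw [PySem.List.foldl_append_singleton_eq_map]
  simp only [List.nil_append]
  apply List.map_congr_left
  intro i hi
  have hSnodup : (PySem.Set.ofList report).Nodup := PySem.Set.nodup_ofList report
  have hinj : ∀ r ∈ PySem.Set.ofList report, ∀ r' ∈ PySem.Set.ofList report,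
      pvFst r = pvFst r' → pvSnd r = pvSnd r' → r = r' := by
    intro r hr r' hr' h1 h2
    have e1 := split_two_eq r _ _ (hS r hr)
    have e2 := split_two_eq r' _ _ (hS r' hr')
    apply String.toList_inj.mp
    rw [e1, e2, h1, h2]
  -- characterize A's two dicts
  have hcnt : ∀ j, (List.foldl (fun c r => c.modify (pvSnd r) 0 fun x => x + 1)
      PySem.Dict.empty (PySem.Set.ofList report)).getD j 0
      = (((PySem.Set.ofList report).filter (fun r => pvSnd r == j)).length : Int) := by
    intro j
    rw [getD_foldl_modify_key (PySem.Set.ofList report) pvSnd 0 (fun _ v => v + 1) PySem.Dict.empty j]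
    rw [PySem.Dict.getD_empty]
    rw [PySem.List.foldl_add ((PySem.Set.ofList report).filter (fun r => pvSnd r == j)) (fun _ => 1) 0]
    rw [PySem.List.sum_map_const_int]
    ring
  have hdic : (List.foldl (fun d r => d.modify (pvFst r) [] fun x => x ++ [pvSnd r])
      PySem.Dict.empty (PySem.Set.ofList report)).getD i []
      = ((PySem.Set.ofList report).filter (fun r => pvFst r == i)).map pvSnd := by
    rw [getD_foldl_modify_key (PySem.Set.ofList report) pvFst [] (fun x v => v ++ [pvSnd x]) PySem.Dict.empty i]
    rw [PySem.Dict.getD_empty]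
    rw [PySem.List.foldl_append_singleton_eq_map pvSnd ((PySem.Set.ofList report).filter (fun r => pvFst r == i)) []]
    simp
  rw [hdic]
  rw [PySem.List.foldl_congr_mem _ _
      (fun (t : Int) j => if (fun j => decide (k ≤ (((PySem.Set.ofList report).filter (fun r => pvSnd r == j)).length : Int))) j = true then t + 1 else t) 0
      (by
        intro acc x hx
        rw [hcnt x]
        by_cases h : k ≤ (((PySem.Set.ofList report).filter (fun r => pvSnd r == x)).length : Int) <;>
          simp [h, ge_iff_le])]
  rw [PySem.List.foldl_count_if]
  -- characterize B's dicts
  have hcont0 : (List.foldl (fun (d : PySem.Dict String Int) i => d.insert i 0) PySem.Dict.empty id_list).contains i = true := by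
    rw [PySem.Dict.contains_iff_mem_keys]
    rw [PySem.Dict.keys_foldl_insert id_list (fun _ _ => (0 : Int)) PySem.Dict.empty]
    rw [PySem.Dict.keys_empty, PySem.Set.update_nil_left]
    exact (PySem.Set.mem_ofList id_list i).2 hi
  have hrkeys : (List.foldl (fun d r => d.modify (pvSnd r) PySem.Set.empty fun s => s.add (pvFst r))
      PySem.Dict.empty (PySem.Set.ofList report)).keys
      = PySem.Set.ofList ((PySem.Set.ofList report).map pvSnd) := by
    rw [PySem.Dict.keys_foldl_modify_key (PySem.Set.ofList report) pvSnd PySem.Set.empty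
      (fun _ r => fun s => s.add (pvFst r)) PySem.Dict.empty]
    rw [PySem.Dict.keys_empty, PySem.Set.update_nil_left]
  have hR : ∀ b, (List.foldl (fun d r => d.modify (pvSnd r) PySem.Set.empty fun s => s.add (pvFst r))
      PySem.Dict.empty (PySem.Set.ofList report)).getD b PySem.Set.empty
      = PySem.Set.ofList (((PySem.Set.ofList report).filter (fun r => pvSnd r == b)).map pvFst) := by
    intro b
    rw [getD_foldl_modify_key (PySem.Set.ofList report) pvSnd PySem.Set.empty
      (fun r s => s.add (pvFst r)) PySem.Dict.empty b]
    rw [PySem.Dict.getD_empty]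
    rw [← PySem.Set.update_map_eq_foldl_add ((PySem.Set.ofList report).filter (fun r => pvSnd r == b)) pvFst PySem.Set.empty]
    rw [PySem.Set.update_empty]
  have hitems : (List.foldl (fun d r => d.modify (pvSnd r) PySem.Set.empty fun s => s.add (pvFst r))
      PySem.Dict.empty (PySem.Set.ofList report)).items
      = (PySem.Set.ofList ((PySem.Set.ofList report).map pvSnd)).map
          (fun b => (b, (List.foldl (fun d r => d.modify (pvSnd r) PySem.Set.empty fun s => s.add (pvFst r))
            PySem.Dict.empty (PySem.Set.ofList report)).getD b PySem.Set.empty)) := by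
    rw [PySem.Dict.items_eq_map_keys _ (by rw [hrkeys]; exact PySem.Set.nodup_ofList _) PySem.Set.empty]
    rw [hrkeys]
  rw [outer_getD k i _ _ hcont0]
  rw [score0_getD id_list PySem.Dict.empty (fun j => by simp) i]
  rw [hitems, List.map_map]
  -- nodup of each reporter set
  have hRnodup : ∀ b, (((PySem.Set.ofList report).filter (fun r => pvSnd r == b)).map pvFst).Nodup := by
    intro b
    apply (List.nodup_map_iff_inj_on (List.Nodup.filter _ hSnodup)).mpr
    intro x hx y hy hxy
    have hxS := List.mem_filter.1 hx
    have hyS := List.mem_filter.1 hy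
    refine hinj x hxS.1 y hyS.1 hxy ?_
    have h1 : pvSnd x = b := by simpa using hxS.2
    have h2 : pvSnd y = b := by simpa using hyS.2
    rw [h1, h2]
  -- turn each summand into a 0/1 indicator
  rw [List.map_congr_left (l := PySem.Set.ofList ((PySem.Set.ofList report).map pvSnd))
      (g := fun b => if (fun b => decide (k ≤ (((PySem.Set.ofList report).filter (fun r => pvSnd r == b)).length : Int))
            && decide (i ∈ ((PySem.Set.ofList report).filter (fun r => pvSnd r == b)).map pvFst)) b = true
          then (1 : Int) else 0)
      (by
        intro b _
        simp only [Function.comp]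
        rw [hR b, PySem.Set.ofList_eq_self_of_nodup _ (hRnodup b)]
        simp only [List.length_map]
        by_cases hk : k ≤ (((PySem.Set.ofList report).filter (fun r => pvSnd r == b)).length : Int)
        · by_cases hib : i ∈ ((PySem.Set.ofList report).filter (fun r => pvSnd r == b)).map pvFst
          · rw [List.count_eq_one_of_mem (hRnodup b) hib]
            simp [hk, hib]
          · rw [List.count_eq_zero.mpr hib]
            simp [hk, hib]
        · simp [hk])]
  rw [PySem.List.sum_map_ite_one_zero]
  -- both sides are counts of the same set of banned users reported by i
  simp only [zero_add, Nat.cast_inj]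
  rw [List.countP_eq_length_filter, List.countP_eq_length_filter]
  -- M.filter p and Bk.filter q are nodup lists with the same members
  have hMnodup : ((List.filter (fun r => pvFst r == i) (PySem.Set.ofList report)).map pvSnd).Nodup := by
    apply (List.nodup_map_iff_inj_on (List.Nodup.filter _ hSnodup)).mpr
    intro x hx y hy hxy
    have hxS := List.mem_filter.1 hx
    have hyS := List.mem_filter.1 hy
    refine hinj x hxS.1 y hyS.1 ?_ hxy
    have h1 : pvFst x = i := by simpa using hxS.2
    have h2 : pvFst y = i := by simpa using hyS.2
    rw [h1, h2]
  apply List.Perm.length_eq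
  apply (List.perm_ext_iff_of_nodup (List.Nodup.filter _ hMnodup)
    (List.Nodup.filter _ (PySem.Set.nodup_ofList _))).2
  intro b
  simp only [List.mem_filter, List.mem_map, PySem.Set.mem_ofList, Bool.and_eq_true,
    decide_eq_true_eq, beq_iff_eq]
  tauto

-- ===== VERDICT (by name: the statement is the Claim_ definition above) =====
theorem solution_spec : Claim_equal_solution := by
  intro id_list report k _hdom hpre
  unfold Pre_solution at hpre
  unfold Spec_solution
  exact main_eq id_list report k hpre
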